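-- pv_equiv track=rewrite | github.com/SagarDhok/CodeDaily | GeeksOfGeeks/day-124.py | distinctAdjacentElement
-- ===== SOURCE A (Python) =====
-- def distinctAdjacentElement(arr):
--     n = len(arr)
--     freq = {}
--     for i in range(n):
--         if arr[i] in freq:
--             freq[arr[i]] += 1
--         else:
--             freq[arr[i]] = 1
--     max_freq = 0
--     for key in freq:
--         if freq[key] > max_freq:
--             max_freq = freq[key]
--     if max_freq > (n + 1) // 2:
--         return False
--     return True
-- ===== SOURCE B (Python) =====
-- def distinctAdjacentElement(arr):
--     # Sort a copy, then sweep once tracking the current run of equal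
--     # adjacent elements; the longest run in the sorted list is the
--     # maximum frequency.  No hash map needed.
--     s = sorted(arr)
--     max_run = 0
--     run = 0
--     prev = None
--     for x in s:
--         run = run + 1 if prev is not None and x == prev else 1
--         if run > max_run:
--             max_run = run
--         prev = x
--     return max_run <= (len(arr) + 1) // 2
-- ===== Notes on version B (the rewrite author's own statement) =====
-- stated objective: alternative
-- what changed: Replaces the dict frequency table plus a second max-scan over its keys by sorting a copy of the list and doing one sweep that tracks the longest run of equal adjacent elements, which in a sorted list equals the maximum frequency.
import Mathlib
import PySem

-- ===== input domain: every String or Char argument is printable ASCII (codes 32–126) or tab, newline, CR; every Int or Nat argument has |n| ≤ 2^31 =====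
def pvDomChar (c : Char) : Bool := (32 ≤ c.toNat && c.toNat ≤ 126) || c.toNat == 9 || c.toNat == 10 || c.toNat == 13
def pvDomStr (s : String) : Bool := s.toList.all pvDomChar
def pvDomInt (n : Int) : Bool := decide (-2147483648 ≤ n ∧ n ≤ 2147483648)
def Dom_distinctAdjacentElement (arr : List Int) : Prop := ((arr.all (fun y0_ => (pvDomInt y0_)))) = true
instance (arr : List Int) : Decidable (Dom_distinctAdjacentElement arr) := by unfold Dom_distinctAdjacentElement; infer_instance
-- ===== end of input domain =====

-- B replaces A's dict frequency table (and its second max-scan over the keys) by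
-- sorting a copy of the list and making one sweep over runs of equal adjacent
-- elements (alternative algorithm, same results on every input).

-- ===== PORT A =====
def distinctAdjacentElement (arr : List Int) : Bool :=
  let n : Int := arr.length
  let freq : PySem.Dict Int Int :=
    (PySem.List.pyRange 0 n 1).foldl
      (fun d i =>
        if d.contains (PySem.List.pyGetD arr i 0) then
          d.modify (PySem.List.pyGetD arr i 0) 0 (· + 1)
        else
          d.insert (PySem.List.pyGetD arr i 0) 1)
      PySem.Dict.empty
  let maxFreq : Int :=
    freq.keys.foldl (fun m k => if freq.getD k 0 > m then freq.getD k 0 else m) 0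
  if maxFreq > PySem.Int.floordiv (n + 1) 2 then false else true

-- ===== PORT B =====
def distinctAdjacentElement_alt (arr : List Int) : Bool :=
  let s := PySem.List.sorted arr (fun x => x) false
  let st : Int × Int × Option Int :=
    s.foldl
      (fun st x =>
        let run := if st.2.2 = some x then st.2.1 + 1 else 1
        let maxRun := if run > st.1 then run else st.1
        (maxRun, run, some x))
      (0, 0, none)
  decide (st.1 ≤ PySem.Int.floordiv ((arr.length : Int) + 1) 2)

-- ===== PRECONDITION & SPEC =====
def Spec_distinctAdjacentElement (arr : List Int) (out : Bool) : Prop := out = distinctAdjacentElement_alt arr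
instance (arr : List Int) (out : Bool) : Decidable (Spec_distinctAdjacentElement arr out) := by unfold Spec_distinctAdjacentElement; infer_instance

-- ===== CLAIM (what is proved, stated in full; the proofs are below) =====
def Claim_equal_distinctAdjacentElement : Prop := ∀ (arr : List Int), Dom_distinctAdjacentElement arr → Spec_distinctAdjacentElement arr (distinctAdjacentElement arr)

-- ===== LEMMAS AND PROOFS =====

-- B's sweep over the sorted list, abstracted for the proofs (definitionally the fold in the port of B).
def dSweep (s : List Int) : Int × Int × Option Int :=
  s.foldl
    (fun st x =>
      let run := if st.2.2 = some x then st.2.1 + 1 else 1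
      let maxRun := if run > st.1 then run else st.1
      (maxRun, run, some x))
    (0, 0, none)

theorem dSweep_append (s : List Int) (x : Int) (m r : Int) (p : Option Int)
    (h : dSweep s = (m, r, p)) :
    dSweep (s ++ [x]) =
      (if (if p = some x then r + 1 else 1) > m then (if p = some x then r + 1 else 1) else m,
       if p = some x then r + 1 else 1, some x) := by
  simp only [dSweep, List.foldl_append, List.foldl_cons, List.foldl_nil]
  rw [show s.foldl _ (0,0,none) = (m,r,p) from h]

theorem sorted_le_getLast (s : List Int) (hs : s.Pairwise (· ≤ ·)) (h : s ≠ []) :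
    ∀ y ∈ s, y ≤ s.getLast h := by
  induction s using List.reverseRecOn with
  | nil => simp at h
  | append_singleton s x ih =>
    intro y hy
    rw [List.getLast_append_singleton]
    rcases List.mem_append.1 hy with hy | hy
    · exact (List.pairwise_append.1 hs).2.2 y hy x (by simp)
    · simp at hy; omega


-- Invariant of B's sweep over a sorted list: the carried prev/run/max are the last
-- element, the count of the last element, and a maximum of the per-element counts.
theorem dSweep_spec (s : List Int) (hs : s.Pairwise (· ≤ ·)) :
    (dSweep s).2.2 = s.getLast? ∧
    (∀ h : s ≠ [], (dSweep s).2.1 = (s.count (s.getLast h) : Int)) ∧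
    (s = [] → (dSweep s).1 = 0) ∧
    (∀ x ∈ s, (s.count x : Int) ≤ (dSweep s).1) ∧
    ((dSweep s).1 = 0 ∨ ∃ x ∈ s, (dSweep s).1 = (s.count x : Int)) := by
  induction s using List.reverseRecOn with
  | nil => simp [dSweep]
  | append_singleton s x ih =>
    have hps : s.Pairwise (· ≤ ·) := (List.pairwise_append.1 hs).1
    have hle : ∀ y ∈ s, y ≤ x := fun y hy => (List.pairwise_append.1 hs).2.2 y hy x (by simp)
    obtain ⟨ih1, ih2, ih3, ih4, ih5⟩ := ih hps
    rcases hds : dSweep s with ⟨m, r, p⟩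
    rw [hds] at ih1 ih2 ih3 ih4 ih5
    simp only at ih1 ih2 ih3 ih4 ih5
    rw [dSweep_append s x m r p hds]
    rcases eq_or_ne s [] with rfl | hne
    · have hp : p = none := by simpa using ih1
      have hm0 : m = 0 := ih3 rfl
      subst hp hm0
      simp
    · have hlast : s.getLast? = some (s.getLast hne) := List.getLast?_eq_some_getLast hne
      have hrun : r = (s.count (s.getLast hne) : Int) := ih2 hne
      have hlmem : s.getLast hne ∈ s := List.getLast_mem hne
      have hcnt1 : 1 ≤ s.count (s.getLast hne) := List.count_pos_iff.2 hlmem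
      have hm1 : (1:Int) ≤ m := le_trans (by exact_mod_cast hcnt1) (ih4 _ hlmem)
      by_cases hx : s.getLast hne = x
      · -- x equals the last element of s: the run extends by one
        have hp : p = some x := by rw [ih1, hlast, hx]
        have hcount : (s ++ [x]).count x = s.count x + 1 := by simp [List.count_append]
        have hcounty : ∀ y, y ≠ x → (s ++ [x]).count y = s.count y := by
          intro y hy; simp [List.count_append, Ne.symm hy]
        have hrx : r = (s.count x : Int) := by rw [hrun, hx]
        rw [if_pos hp]
        refine ⟨by simp, ?_, by simp, ?_, ?_⟩
        · intro _
          rw [List.getLast_append_singleton, hcount, hrx]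
          push_cast; ring
        · intro y hy
          by_cases hyx : y = x
          · subst hyx
            rw [hcount, hrx]
            simp only
            split_ifs <;> push_cast <;> omega
          · have hy' : y ∈ s := by
              rcases List.mem_append.1 hy with h | h
              · exact h
              · simp at h; exact absurd h hyx
            have h4 := ih4 y hy'
            rw [hcounty y hyx]
            simp only
            split_ifs <;> omega
        · simp only
          split_ifs with hgt
          · right
            exact ⟨x, by simp, by rw [hcount, hrx]; push_cast; ring⟩
          · rcases ih5 with h0 | ⟨y, hy, hvy⟩
            · omega
            · right
              have hyne : y ≠ x := by
                intro h; subst h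
                rw [hrx] at hgt; rw [hvy] at hgt; omega
              exact ⟨y, List.mem_append_left _ hy, by rw [hcounty y hyne]; exact hvy⟩
      · -- x is strictly greater than everything in s: the run resets to 1
        have hxs : x ∉ s := by
          intro hmem
          exact hx (le_antisymm (hle _ hlmem) (sorted_le_getLast s hps hne x hmem))
        have hp : p ≠ some x := by rw [ih1, hlast]; simp [hx]
        have hcount : (s ++ [x]).count x = 1 := by
          simp [List.count_append, List.count_eq_zero_of_not_mem hxs]
        have hcounty : ∀ y, y ≠ x → (s ++ [x]).count y = s.count y := by
          intro y hy; simp [List.count_append, Ne.symm hy]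
        rw [if_neg hp]
        have hmax : ¬ ((1:Int) > m) := by omega
        rw [if_neg hmax]
        refine ⟨by simp, ?_, by simp, ?_, ?_⟩
        · intro _
          rw [List.getLast_append_singleton, hcount]
          norm_num
        · intro y hy
          by_cases hyx : y = x
          · subst hyx; rw [hcount]; push_cast; omega
          · have hy' : y ∈ s := by
              rcases List.mem_append.1 hy with h | h
              · exact h
              · simp at h; exact absurd h hyx
            rw [hcounty y hyx]; exact ih4 y hy'
        · rcases ih5 with h0 | ⟨y, hy, hvy⟩
          · omega
          · right
            have hyne : y ≠ x := fun h => hxs (h ▸ hy)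
            exact ⟨y, List.mem_append_left _ hy, by rw [hcounty y hyne]; exact hvy⟩

-- A's maximum frequency, abstracted for the proofs.
def aMax (arr : List Int) : Int :=
  (PySem.Set.ofList arr).foldl
    (fun m k => if (arr.count k : Int) > m then (arr.count k : Int) else m) 0

theorem foldl_max_spec (f : Int → Int) (l : List Int) (m0 : Int) :
    m0 ≤ l.foldl (fun m k => if f k > m then f k else m) m0 ∧
    (∀ k ∈ l, f k ≤ l.foldl (fun m k => if f k > m then f k else m) m0) ∧
    (l.foldl (fun m k => if f k > m then f k else m) m0 = m0 ∨
      ∃ k ∈ l, l.foldl (fun m k => if f k > m then f k else m) m0 = f k) := by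
  induction l generalizing m0 with
  | nil => simp
  | cons a l ih =>
    simp only [List.foldl_cons]
    by_cases hfa : f a > m0
    · rw [if_pos hfa]
      obtain ⟨h1, h2, h3⟩ := ih (f a)
      refine ⟨by omega, ?_, ?_⟩
      · intro k hk
        rcases List.mem_cons.1 hk with rfl | hk
        · exact h1
        · exact h2 k hk
      · rcases h3 with h | ⟨k, hk, hv⟩
        · exact Or.inr ⟨a, by simp, h⟩
        · exact Or.inr ⟨k, List.mem_cons_of_mem _ hk, hv⟩
    · rw [if_neg hfa]
      obtain ⟨h1, h2, h3⟩ := ih m0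
      refine ⟨h1, ?_, ?_⟩
      · intro k hk
        rcases List.mem_cons.1 hk with rfl | hk
        · omega
        · exact h2 k hk
      · rcases h3 with h | ⟨k, hk, hv⟩
        · exact Or.inl h
        · exact Or.inr ⟨k, List.mem_cons_of_mem _ hk, hv⟩


-- A's dict-building loop is Counter(arr).
theorem a_freq_eq_counter (arr : List Int) :
    (PySem.List.pyRange 0 (arr.length : Int) 1).foldl
      (fun (d : PySem.Dict Int Int) i =>
        if d.contains (PySem.List.pyGetD arr i 0) then
          d.modify (PySem.List.pyGetD arr i 0) 0 (· + 1)
        else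
          d.insert (PySem.List.pyGetD arr i 0) 1)
      PySem.Dict.empty = PySem.Dict.counter arr := by
  rw [PySem.List.foldl_pyRange_zero_pyGetD' arr 0
      (fun (d : PySem.Dict Int Int) x =>
        if d.contains x then d.modify x 0 (· + 1) else d.insert x 1) PySem.Dict.empty]
  rw [PySem.List.foldl_congr_mem arr _ (fun (d : PySem.Dict Int Int) x => d.modify x 0 (· + 1))
      PySem.Dict.empty ?_]
  · rfl
  · intro d x _
    by_cases hc : d.contains x
    · rw [if_pos hc]
    · rw [if_neg (by simp [hc])]
      show d.insert x 1 = d.insert x (d.getD x 0 + 1)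
      rw [PySem.Dict.getD_of_not_contains d 0 (by simp [hc])]
      norm_num


-- A's result, characterised.
theorem a_eq_decide (arr : List Int) :
    distinctAdjacentElement arr
      = decide (aMax arr ≤ PySem.Int.floordiv ((arr.length : Int) + 1) 2) := by
  have hmf :
      ((PySem.Dict.counter arr).keys).foldl
        (fun m k => if (PySem.Dict.counter arr).getD k 0 > m then (PySem.Dict.counter arr).getD k 0 else m) 0
        = aMax arr := by
    rw [PySem.List.foldl_congr_mem _ _
        (fun (m : Int) k => if (arr.count k : Int) > m then (arr.count k : Int) else m) 0 ?_]
    · rw [PySem.Dict.keys_counter]; rfl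
    · intro m k _
      rw [PySem.Dict.getD_counter]
  simp only [distinctAdjacentElement, a_freq_eq_counter, hmf]
  by_cases h : aMax arr > PySem.Int.floordiv ((arr.length : Int) + 1) 2
  · rw [if_pos h]; symm; rw [decide_eq_false_iff_not]; omega
  · rw [if_neg h]; symm; rw [decide_eq_true_eq]; omega
theorem a_eq_b (arr : List Int) :
    distinctAdjacentElement arr = distinctAdjacentElement_alt arr := by
  rw [a_eq_decide]
  have hsp : (PySem.List.sorted arr (fun x => x) false).Pairwise (· ≤ ·) :=
    PySem.List.sorted_pairwise arr (fun x => x)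
  set s := PySem.List.sorted arr (fun x => x) false with hsdef
  have hperm : s.Perm arr := PySem.List.sorted_perm arr (fun x => x) false
  have hcnt : ∀ x, s.count x = arr.count x := fun x => hperm.count_eq x
  have hmem : ∀ x, x ∈ s ↔ x ∈ arr := fun x => hperm.mem_iff
  obtain ⟨-, -, -, hB4, hB5⟩ := dSweep_spec s hsp
  obtain ⟨-, hA4, hA5⟩ :=
    foldl_max_spec (fun k => (arr.count k : Int)) (PySem.Set.ofList arr) 0
  have halt : distinctAdjacentElement_alt arr
      = decide ((dSweep s).1 ≤ PySem.Int.floordiv ((arr.length : Int) + 1) 2) := rfl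
  have haMax : aMax arr = (PySem.Set.ofList arr).foldl
      (fun m k => if (fun k => (arr.count k : Int)) k > m then (fun k => (arr.count k : Int)) k else m) 0 := rfl
  rw [halt, decide_eq_decide]
  rw [haMax] at *
  have ht : 0 ≤ PySem.Int.floordiv ((arr.length : Int) + 1) 2 := by
    rw [PySem.Int.floordiv_eq_ediv_of_pos (by norm_num)]
    exact Int.ediv_nonneg (by positivity) (by norm_num)
  constructor
  · intro h
    rcases hB5 with h0 | ⟨x, hx, hv⟩
    · omega
    · rw [hv, hcnt x]
      exact le_trans (hA4 x ((PySem.Set.mem_ofList _ _).2 ((hmem x).1 hx))) h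
  · intro h
    rcases hA5 with h0 | ⟨k, hk, hv⟩
    · omega
    · rw [hv]
      have hks : k ∈ s := (hmem k).2 ((PySem.Set.mem_ofList _ _).1 hk)
      rw [← hcnt k]
      exact le_trans (hB4 k hks) h

-- ===== VERDICT (by name: the statement is the Claim_ definition above) =====
theorem distinctAdjacentElement_spec : Claim_equal_distinctAdjacentElement := by
  intro arr _
  exact a_eq_b arr
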